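-- pv_equiv track=rewrite | github.com/andrew-d-gordon/Portfolio | poly-ns-tuner/src/pitch_tracking.py | find_finished_notes
-- ===== SOURCE A (Python) =====
-- def note_with_end_frame(note, end_frame):
--     note.append(end_frame)
--     return note
--
-- def find_finished_notes(new_note_preds_mps, pitch_track_notes_all, pitch_track_notes_set, frame_count):
--
--     # INIT NOTES_TO_END RETURN LIST
--     notes_to_end = []
--     notes_to_remove = []
--
--     # IF NOTE IN PREVIOUS PITCH TRACK SET NOT IN NEW_NOTE_PREDS, RECORD END OF NOTE, POP FROM PITCH TRACK
--     for note in pitch_track_notes_set: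
--         if note not in new_note_preds_mps:
--             # FIND IDX OF NOTE FOR BOTH PITCH TRACK LISTS
--             note_to_end_idx = pitch_track_notes_set.index(note)
--             note_to_end = pitch_track_notes_all[note_to_end_idx]
--
--             # ADD ENDED NOTE WITH END_FRAME INFO TO NOTES_TO_END
--             notes_to_remove.append(note_to_end)
--             notes_to_end.append(note_with_end_frame(note_to_end, frame_count))
--
--         else:
--             continue
--
--     # POP REMOVED NOTE(S) FROM PITCH TRACK LISTS
--     for note_r in notes_to_remove:
--         pitch_track_notes_all.remove(note_r)
--         pitch_track_notes_set.remove(note_r[0])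
--
--     return notes_to_end
-- ===== SOURCE B (Python) =====
-- def find_finished_notes(new_note_preds_mps, pitch_track_notes_all, pitch_track_notes_set, frame_count):
--     # One partitioning pass: a pitch no longer predicted gets its end frame
--     # appended and is returned; survivors are written back in place.
--     preds = set(new_note_preds_mps)
--     notes_to_end = []
--     kept_all = []
--     kept_set = []
--     for note, row in zip(pitch_track_notes_set, pitch_track_notes_all):
--         if note in preds:
--             kept_all.append(row)
--             kept_set.append(note)
--         else:
--             row.append(frame_count)
--             notes_to_end.append(row)
--     pitch_track_notes_all[:] = kept_all
--     pitch_track_notes_set[:] = kept_set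
--     return notes_to_end
-- ===== Notes on version B (the rewrite author's own statement) =====
-- stated objective: simpler
-- what changed: Replaces the per-note .index lookup plus a separate remove-by-value pass with a single partitioning pass over zip(pitch_track_notes_set, pitch_track_notes_all) writing survivors back by slice assignment; Pre_ excludes inputs where A raises (IndexError/ValueError from mismatched lists) and duplicate ended pitches, on which A's repeated .index of the first occurrence double-appends frame_count to one aliased row.
import Mathlib
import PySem

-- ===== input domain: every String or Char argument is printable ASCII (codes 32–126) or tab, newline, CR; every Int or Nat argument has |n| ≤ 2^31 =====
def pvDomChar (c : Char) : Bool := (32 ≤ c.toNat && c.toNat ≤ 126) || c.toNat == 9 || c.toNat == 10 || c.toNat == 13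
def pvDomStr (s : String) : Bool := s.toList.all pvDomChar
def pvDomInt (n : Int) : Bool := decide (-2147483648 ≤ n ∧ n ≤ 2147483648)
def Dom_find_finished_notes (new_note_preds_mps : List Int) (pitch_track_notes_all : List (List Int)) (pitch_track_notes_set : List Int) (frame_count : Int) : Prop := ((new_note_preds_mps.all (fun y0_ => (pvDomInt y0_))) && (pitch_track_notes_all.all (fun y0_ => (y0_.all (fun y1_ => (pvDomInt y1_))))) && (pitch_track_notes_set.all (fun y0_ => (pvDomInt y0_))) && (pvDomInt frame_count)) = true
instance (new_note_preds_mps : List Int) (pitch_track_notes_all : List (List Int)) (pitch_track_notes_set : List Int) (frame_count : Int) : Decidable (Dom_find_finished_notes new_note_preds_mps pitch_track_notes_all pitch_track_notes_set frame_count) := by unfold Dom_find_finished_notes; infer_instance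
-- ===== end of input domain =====

-- B replaces A's per-note .index lookup plus separate remove-by-value pass with one
-- partitioning pass over zip(set, all); equivalence is proved for the RETURN VALUE only
-- (both Pythons also mutate the two list arguments in place; B does so by slice assignment).

-- ===== PORT A =====
-- the first loop of A: iterates over pitch_track_notes_set; mutation of a row by
-- note.append(frame_count) is modelled by List.set at the looked-up index; state is
-- (pitch_track_notes_all, notes_to_end).  (notes_to_remove and the second removal loop
-- only mutate the argument lists and cannot change the already-built returned list.)
def ffnLoopA (new_note_preds_mps : List Int) (pitch_track_notes_set : List Int)
    (frame_count : Int) :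
    List Int → List (List Int) → List (List Int) → List (List Int) × List (List Int)
  | [], all, notes_to_end => (all, notes_to_end)
  | note :: rest, all, notes_to_end =>
    if note ∉ new_note_preds_mps then
      match PySem.List.index? pitch_track_notes_set note with
      | none =>  -- unreachable: note was drawn from pitch_track_notes_set
        ffnLoopA new_note_preds_mps pitch_track_notes_set frame_count rest all notes_to_end
      | some note_to_end_idx =>
        match PySem.List.pyGet? all (note_to_end_idx : Int) with
        | none =>  -- Python raises IndexError here (outside Pre_)
          ffnLoopA new_note_preds_mps pitch_track_notes_set frame_count rest all notes_to_end
        | some note_to_end =>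
          -- note_with_end_frame mutates the row in place and returns it
          let ended := note_to_end ++ [frame_count]
          ffnLoopA new_note_preds_mps pitch_track_notes_set frame_count rest
            (all.set note_to_end_idx ended) (notes_to_end ++ [ended])
    else
      ffnLoopA new_note_preds_mps pitch_track_notes_set frame_count rest all notes_to_end

def find_finished_notes (new_note_preds_mps : List Int) (pitch_track_notes_all : List (List Int)) (pitch_track_notes_set : List Int) (frame_count : Int) : List (List Int) :=
  (ffnLoopA new_note_preds_mps pitch_track_notes_set frame_count
    pitch_track_notes_set pitch_track_notes_all []).2

-- ===== PORT B =====
-- single pass over zip(pitch_track_notes_set, pitch_track_notes_all); only the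
-- returned notes_to_end list is modelled (the slice assignments mutate arguments only).
def find_finished_notes_alt (new_note_preds_mps : List Int) (pitch_track_notes_all : List (List Int)) (pitch_track_notes_set : List Int) (frame_count : Int) : List (List Int) :=
  let preds := PySem.Set.ofList new_note_preds_mps
  (pitch_track_notes_set.zip pitch_track_notes_all).filterMap (fun p =>
    if PySem.Set.contains preds p.1 then none else some (p.2 ++ [frame_count]))

-- ===== PRECONDITION & SPEC =====
-- heads the removal loop will pass to pitch_track_notes_set.remove: for each ended
-- index i, the first element of pitch_track_notes_all[i] after frame_count is appended
def ffnEndedHeads (new_note_preds_mps : List Int) (pitch_track_notes_all : List (List Int)) (pitch_track_notes_set : List Int) (frame_count : Int) : List Int :=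
  (List.range pitch_track_notes_set.length).filterMap (fun i =>
    if (pitch_track_notes_set[i]?.getD 0) ∉ new_note_preds_mps then
      ((pitch_track_notes_all[i]?.getD []) ++ [frame_count]).head? else none)

-- Pre_ excludes the inputs on which A raises (IndexError when an ended note's index exceeds
-- pitch_track_notes_all, ValueError when the removal loop cannot find a row's head in the
-- pitch set) and duplicate pitches among ended notes, on which A's repeated .index of the
-- first occurrence double-appends frame_count to one aliased row — an artefact of A's
-- implementation.
def Pre_find_finished_notes (new_note_preds_mps : List Int) (pitch_track_notes_all : List (List Int)) (pitch_track_notes_set : List Int) (frame_count : Int) : Prop :=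
  (∀ i < pitch_track_notes_set.length,
    (pitch_track_notes_set[i]?.getD 0) ∉ new_note_preds_mps →
      (i < pitch_track_notes_all.length ∧
       pitch_track_notes_set.count (pitch_track_notes_set[i]?.getD 0) = 1)) ∧
  (∀ v ∈ ffnEndedHeads new_note_preds_mps pitch_track_notes_all pitch_track_notes_set frame_count,
    (ffnEndedHeads new_note_preds_mps pitch_track_notes_all pitch_track_notes_set frame_count).count v
      ≤ pitch_track_notes_set.count v)
instance (new_note_preds_mps : List Int) (pitch_track_notes_all : List (List Int)) (pitch_track_notes_set : List Int) (frame_count : Int) : Decidable (Pre_find_finished_notes new_note_preds_mps pitch_track_notes_all pitch_track_notes_set frame_count) := by unfold Pre_find_finished_notes; infer_instance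

def pvWitness_find_finished_notes : List Int × List (List Int) × List Int × Int :=
  ([60, 64], [[60, 3], [62, 5], [64, 6]], [60, 62, 64], 9)

def Spec_find_finished_notes (new_note_preds_mps : List Int) (pitch_track_notes_all : List (List Int)) (pitch_track_notes_set : List Int) (frame_count : Int) (out : List (List Int)) : Prop := out = find_finished_notes_alt new_note_preds_mps pitch_track_notes_all pitch_track_notes_set frame_count
instance (new_note_preds_mps : List Int) (pitch_track_notes_all : List (List Int)) (pitch_track_notes_set : List Int) (frame_count : Int) (out : List (List Int)) : Decidable (Spec_find_finished_notes new_note_preds_mps pitch_track_notes_all pitch_track_notes_set frame_count out) := by unfold Spec_find_finished_notes; infer_instance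

-- ===== CLAIM (what is proved, stated in full; the proofs are below) =====
def Claim_equal_find_finished_notes : Prop := ∀ (new_note_preds_mps : List Int) (pitch_track_notes_all : List (List Int)) (pitch_track_notes_set : List Int) (frame_count : Int), Dom_find_finished_notes new_note_preds_mps pitch_track_notes_all pitch_track_notes_set frame_count → Pre_find_finished_notes new_note_preds_mps pitch_track_notes_all pitch_track_notes_set frame_count → Spec_find_finished_notes new_note_preds_mps pitch_track_notes_all pitch_track_notes_set frame_count (find_finished_notes new_note_preds_mps pitch_track_notes_all pitch_track_notes_set frame_count)

-- ===== LEMMAS AND PROOFS =====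

-- the value A appends for an ended note, phrased against the ORIGINAL row list
def ffnRowEnd (set0 : List Int) (allOrig : List (List Int)) (fc : Int) (n : Int) :
    Option (List Int) :=
  ((PySem.List.index? set0 n).bind (fun i => allOrig[i]?)).map (· ++ [fc])

theorem ffnLoopA_spec (preds set0 : List Int) (fc : Int) (allOrig : List (List Int)) :
    ∀ (rest : List Int) (all acc : List (List Int)),
    (∀ n ∈ rest, n ∉ preds → ∃ i row, PySem.List.index? set0 n = some i ∧
        all[i]? = some row ∧ allOrig[i]? = some row) →
    (rest.filter (fun n => !decide (n ∈ preds))).Nodup →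
    (ffnLoopA preds set0 fc rest all acc).2 =
      acc ++ rest.filterMap (fun n => if n ∈ preds then none else
        ffnRowEnd set0 allOrig fc n) := by
  intro rest
  induction rest with
  | nil => intro all acc _ _; simp [ffnLoopA]
  | cons n rest ih =>
    intro all acc hinv hnd
    by_cases hn : n ∈ preds
    · rw [show ffnLoopA preds set0 fc (n :: rest) all acc =
          ffnLoopA preds set0 fc rest all acc by simp [ffnLoopA, hn]]
      rw [List.filter_cons_of_neg (by simp [hn]), List.filterMap_cons] at *
      rw [ih all acc (fun m hm => hinv m (List.mem_cons_of_mem _ hm)) hnd]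
      simp [hn]
    · obtain ⟨i, row, hidx, hall, horig⟩ := hinv n (List.mem_cons_self) hn
      have hidx' : List.idxOf? n set0 = some i := by simpa using hidx
      rw [List.filter_cons_of_pos (by simpa using hn), List.nodup_cons] at hnd
      obtain ⟨hnmem, hnd1⟩ := hnd
      obtain ⟨hi_lt, hset0_eq, -⟩ := PySem.List.getElem_of_index?_eq_some hidx
      have hinv2 : ∀ m ∈ rest, m ∉ preds → ∃ j rowm,
          PySem.List.index? set0 m = some j ∧
          (all.set i (row ++ [fc]))[j]? = some rowm ∧ allOrig[j]? = some rowm := by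
        intro m hm hmp
        obtain ⟨j, rowm, hj, hallj, horigj⟩ := hinv m (List.mem_cons_of_mem _ hm) hmp
        have hmn : m ≠ n := by
          intro h
          exact hnmem (List.mem_filter.mpr ⟨h ▸ hm, by rw [← h]; simpa using hmp⟩)
        have hji : j ≠ i := by
          intro h
          obtain ⟨hj_lt, hset0j, -⟩ := PySem.List.getElem_of_index?_eq_some hj
          exact hmn (by rw [← hset0j, ← hset0_eq]; simp [h])
        refine ⟨j, rowm, hj, ?_, horigj⟩
        rw [List.getElem?_set_ne (by omega)]
        exact hallj
      rw [show ffnLoopA preds set0 fc (n :: rest) all acc =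
          ffnLoopA preds set0 fc rest (all.set i (row ++ [fc])) (acc ++ [row ++ [fc]])
          by simp [ffnLoopA, hn, hidx', hall]]
      rw [ih _ _ hinv2 hnd1]
      have hrowEnd : ffnRowEnd set0 allOrig fc n = some (row ++ [fc]) := by
        unfold ffnRowEnd
        rw [hidx]
        simp [horig]
      rw [List.filterMap_cons, if_neg hn, hrowEnd]
      simp [List.append_assoc]

theorem filterMap_zip_eq (preds set0 : List Int) (fc : Int) (allOrig : List (List Int)) :
    ∀ (s : List Int) (a : List (List Int)),
    (∀ j, (hj : j < s.length) → s[j] ∉ preds →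
        ((PySem.List.index? set0 s[j]).bind (fun i => allOrig[i]?)) = a[j]?) →
    s.filterMap (fun n => if n ∈ preds then none else ffnRowEnd set0 allOrig fc n) =
      (s.zip a).filterMap (fun p =>
        if PySem.Set.contains (PySem.Set.ofList preds) p.1 then none
        else some (p.2 ++ [fc])) := by
  intro s
  induction s with
  | nil => intro a _; simp
  | cons n s ih =>
    intro a H
    have hmem : PySem.Set.contains (PySem.Set.ofList preds) n = true ↔ n ∈ preds := by
      rw [PySem.Set.contains_iff, PySem.Set.mem_ofList]
    cases a with
    | nil =>
      simp only [List.zip_nil_right, List.filterMap_nil]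
      rw [List.filterMap_eq_nil_iff]
      intro m hm
      obtain ⟨j, hj, rfl⟩ := List.mem_iff_getElem.mp hm
      by_cases hmp : (n :: s)[j] ∈ preds
      · rw [if_pos hmp]
      · have hj0 := H j hj hmp
        simp only [List.getElem?_nil] at hj0
        rw [if_neg hmp]
        unfold ffnRowEnd
        rw [hj0]
        rfl
    | cons r a =>
      have Hs : ∀ j, (hj : j < s.length) → s[j] ∉ preds →
          ((PySem.List.index? set0 s[j]).bind (fun i => allOrig[i]?)) = a[j]? := by
        intro j hj h
        simpa using H (j + 1) (by simpa using Nat.succ_lt_succ hj) (by simpa using h)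
      by_cases hn : n ∈ preds
      · rw [List.zip_cons_cons, List.filterMap_cons, List.filterMap_cons,
          if_pos hn, if_pos (hmem.mpr hn)]
        exact ih a Hs
      · have h0 := H 0 (by simp) (by simpa using hn)
        simp only [List.getElem_cons_zero, List.getElem?_cons_zero] at h0
        have hrowEnd : ffnRowEnd set0 allOrig fc n = some (r ++ [fc]) := by
          unfold ffnRowEnd
          rw [h0]
          rfl
        rw [List.zip_cons_cons, List.filterMap_cons, List.filterMap_cons,
          if_neg hn, if_neg (fun hc => hn (hmem.mp hc)), hrowEnd, ih a Hs]

-- count = 1 at an occurrence forces index? to find exactly that position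
theorem index?_of_count_one (set0 : List Int) (j : Nat) (hj : j < set0.length)
    (h1 : set0.count set0[j] = 1) : PySem.List.index? set0 set0[j] = some j := by
  set v := set0[j] with hv_eq
  have hsplit : set0.take j ++ v :: set0.drop (j + 1) = set0 := by
    rw [hv_eq, List.getElem_cons_drop, List.take_append_drop]
  rw [PySem.List.index?_eq_some_iff]
  refine ⟨set0.take j, set0.drop (j + 1), hsplit.symm, by simp [hj.le], ?_⟩
  intro hv
  rw [← hsplit, List.count_append, List.count_cons_self] at h1
  have h2 := List.one_le_count_iff.mpr hv
  omega

-- ===== VERDICT (by name: the statement is the Claim_ definition above) =====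
theorem find_finished_notes_spec : Claim_equal_find_finished_notes := by
  intro preds allL setL fc _ hpre
  unfold Spec_find_finished_notes find_finished_notes find_finished_notes_alt
  have hidx1 : ∀ j, (hj : j < setL.length) → setL[j] ∉ preds →
      PySem.List.index? setL setL[j] = some j := by
    intro j hj hnp
    have h := hpre.1 j hj (by simpa [List.getElem?_eq_getElem hj] using hnp)
    exact index?_of_count_one setL j hj (by
      simpa [List.getElem?_eq_getElem hj] using h.2)
  have hA := ffnLoopA_spec preds setL fc allL setL allL []
    (by
      intro n hn hnp
      obtain ⟨j, hj, rfl⟩ := List.mem_iff_getElem.mp hn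
      have hpj := hpre.1 j hj (by simpa [List.getElem?_eq_getElem hj] using hnp)
      refine ⟨j, allL[j]'hpj.1, hidx1 j hj hnp, ?_, ?_⟩ <;>
        simp [List.getElem?_eq_getElem hpj.1]
    )
    (by
      rw [List.nodup_iff_count_le_one]
      intro v
      by_cases hv : v ∈ setL.filter (fun n => !decide (n ∈ preds))
      · obtain ⟨hvs, hvp⟩ := List.mem_filter.mp hv
        obtain ⟨j, hj, rfl⟩ := List.mem_iff_getElem.mp hvs
        have hcj := hpre.1 j hj (by
          simpa [List.getElem?_eq_getElem hj] using (by simpa using hvp : setL[j] ∉ preds))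
        calc (setL.filter _).count setL[j]
            ≤ setL.count setL[j] := List.Sublist.count_le _ List.filter_sublist
          _ = 1 := by simpa [List.getElem?_eq_getElem hj] using hcj.2
      · simp [List.count_eq_zero_of_not_mem hv]
    )
  rw [hA, List.nil_append]
  exact filterMap_zip_eq preds setL fc allL setL allL (by
    intro j hj hnp
    rw [hidx1 j hj hnp]
    by_cases hja : j < allL.length
    · simp [List.getElem?_eq_getElem hja]
    · have h := hpre.1 j hj (by simpa [List.getElem?_eq_getElem hj] using hnp)
      omega)
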